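-- pv_equiv track=rewrite | github.com/ad-freiburg/aqqu | answer_type/freebaseize_questions.py | dumb_tokenize
-- ===== SOURCE A (Python) =====
-- def dumb_tokenize(text):
--     toks_split = text.split(' ')
--     build_tok = None
--     for tok in toks_split:
--         if not build_tok:
--             if tok[0] != '[' or tok[-1] == ']':
--                 yield tok
--             else:
--                 build_tok = tok
--         else:
--             if tok[-1] == ']':
--                 yield build_tok+tok
--                 build_tok = None
--             else:
--                 build_tok += ' '+tok
-- ===== SOURCE B (Python) =====
-- def dumb_tokenize(text):
--     toks = text.split(' ')
--     n = len(toks)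
--     i = 0
--     while i < n:
--         t = toks[i]
--         if t[0] != '[' or t[-1] == ']':
--             yield t
--             i += 1
--         else:
--             parts = [t]
--             j = i + 1
--             while j < n and toks[j][-1] != ']':
--                 parts.append(' ' + toks[j])
--                 j += 1
--             if j == n:
--                 return
--             yield ''.join(parts) + toks[j]
--             i = j + 1
-- ===== Notes on version B (the rewrite author's own statement) =====
-- stated objective: alternative
-- what changed: Replaces A's single fold carrying a build_tok accumulator state across iterations with an index-based outer loop plus an explicit inner forward scan that consumes a whole bracketed group at once and joins its parts in one step.
import Mathlib
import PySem

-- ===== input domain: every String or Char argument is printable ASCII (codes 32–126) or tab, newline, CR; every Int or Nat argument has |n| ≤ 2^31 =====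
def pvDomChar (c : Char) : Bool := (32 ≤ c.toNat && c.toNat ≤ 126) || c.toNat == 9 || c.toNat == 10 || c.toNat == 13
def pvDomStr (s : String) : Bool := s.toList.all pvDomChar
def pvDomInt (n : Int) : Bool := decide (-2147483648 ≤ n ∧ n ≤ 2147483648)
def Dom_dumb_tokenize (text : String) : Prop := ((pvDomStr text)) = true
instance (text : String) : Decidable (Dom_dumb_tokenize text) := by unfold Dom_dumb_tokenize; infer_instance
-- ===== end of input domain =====

-- B rewrites A's one-pass fold (stateful build_tok accumulator) as an outer scan with an explicit
-- inner scan that consumes each bracketed group at once; alternative decomposition, same cost.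

-- ===== PORT A =====
-- one step of A's for-loop: state = (yielded so far, build_tok); on an empty token Python raises
-- IndexError (excluded by Pre_); the port then leaves the state unchanged (unreachable under Pre_).
def pvAStep (st : List String × Option String) (tok : String) : List String × Option String :=
  match st with
  | (out, none) =>
    match PySem.Str.pyGet? tok 0, PySem.Str.pyGet? tok (-1) with
    | some c0, some cl =>
      if c0 ≠ '[' ∨ cl = ']' then (out ++ [tok], none) else (out, some tok)
    | _, _ => (out, none)
  | (out, some b) =>
    match PySem.Str.pyGet? tok (-1) with
    | some cl => if cl = ']' then (out ++ [b ++ tok], none) else (out, some (b ++ " " ++ tok))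
    | none => (out, some b)

def dumb_tokenize (text : String) : List String :=
  (((PySem.Str.split? text " ").getD []).foldl pvAStep ([], none)).1

-- ===== PORT B =====
-- inner scan: accumulate ' '-joined parts until a token ending in ']' closes the group;
-- none = the scan ran off the end (unclosed group, dropped); the closing token joins without a space.
def pvBScan (parts : String) (rest : List String) : Option (String × List String) :=
  match rest with
  | [] => none
  | t :: rs =>
    match PySem.Str.pyGet? t (-1) with
    | some cl => if cl = ']' then some (parts ++ t, rs) else pvBScan (parts ++ " " ++ t) rs
    | none => none

-- termination measure for pvBGo: the inner scan consumes at least one token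
theorem pvBScan_lt : ∀ (parts : String) (rest : List String) (tok : String) (rs : List String),
    pvBScan parts rest = some (tok, rs) → rs.length < rest.length := by
  intro parts rest
  induction rest generalizing parts with
  | nil => intro tok rs h; simp [pvBScan] at h
  | cons t ts ih =>
    intro tok rs h
    unfold pvBScan at h
    cases hg : PySem.Str.pyGet? t (-1) with
    | none => rw [hg] at h; simp at h
    | some cl =>
      rw [hg] at h
      dsimp only at h
      by_cases hc : cl = ']'
      · rw [if_pos hc] at h
        simp at h
        simp [← h.2]
      · rw [if_neg hc] at h
        have := ih _ _ _ h
        simp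
        omega

def pvBGo (toks : List String) : List String :=
  match toks with
  | [] => []
  | t :: rest =>
    match PySem.Str.pyGet? t 0, PySem.Str.pyGet? t (-1) with
    | some c0, some cl =>
      if c0 ≠ '[' ∨ cl = ']' then t :: pvBGo rest
      else
        match h : pvBScan t rest with
        | some (tok, rs) => tok :: pvBGo rs
        | none => []
    | _, _ => []
termination_by toks.length
decreasing_by
  · simp
  · have := pvBScan_lt _ _ _ _ h
    simp
    omega

def dumb_tokenize_alt (text : String) : List String :=
  pvBGo ((PySem.Str.split? text " ").getD [])

-- ===== PRECONDITION & SPEC =====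
-- Pre_ excludes texts whose ' '-split contains an empty token (leading/trailing/double space or
-- the empty string): there Python A raises IndexError on tok[0]/tok[-1].
def Pre_dumb_tokenize (text : String) : Prop :=
  ∀ t ∈ (PySem.Str.split? text " ").getD [], t ≠ ""
instance (text : String) : Decidable (Pre_dumb_tokenize text) := by
  unfold Pre_dumb_tokenize; infer_instance

def pvWitness_dumb_tokenize : String := "[a b] c"

def Spec_dumb_tokenize (text : String) (out : List String) : Prop := out = dumb_tokenize_alt text
instance (text : String) (out : List String) : Decidable (Spec_dumb_tokenize text out) := by unfold Spec_dumb_tokenize; infer_instance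

-- ===== CLAIM (what is proved, stated in full; the proofs are below) =====
def Claim_equal_dumb_tokenize : Prop := ∀ (text : String), Dom_dumb_tokenize text → Pre_dumb_tokenize text → Spec_dumb_tokenize text (dumb_tokenize text)

-- ===== LEMMAS AND PROOFS =====

theorem pvLenPos {t : String} (h : t ≠ "") : 0 < t.length := by
  rw [← String.length_toList]
  have hne : t.toList ≠ [] := fun hn => h (String.toList_eq_nil_iff.mp hn)
  exact Nat.pos_of_ne_zero (fun h0 => hne (List.length_eq_zero_iff.mp h0))

theorem pvGet0_ne_none {t : String} (h : t ≠ "") : PySem.Str.pyGet? t 0 ≠ none := by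
  simp [PySem.Str.pyGet?, PySem.Chars.pyGet?, PySem.List.pyGet?, PySem.List.pyIdx?]
  constructor
  · exact pvLenPos h
  · exact h

theorem pvGetNeg1_ne_none {t : String} (h : t ≠ "") : PySem.Str.pyGet? t (-1) ≠ none := by
  simp [PySem.Str.pyGet?, PySem.Chars.pyGet?, PySem.List.pyGet?, PySem.List.pyIdx?]
  constructor
  · exact pvLenPos h
  · exact pvLenPos h

theorem pvBGo_nil : pvBGo [] = [] := by rw [pvBGo]

theorem pvBGo_cons (t : String) (rest : List String) :
    pvBGo (t :: rest) =
      match PySem.Str.pyGet? t 0, PySem.Str.pyGet? t (-1) with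
      | some c0, some cl =>
        if c0 ≠ '[' ∨ cl = ']' then t :: pvBGo rest
        else
          match pvBScan t rest with
          | some (tok, rs) => tok :: pvBGo rs
          | none => []
      | _, _ => [] := by
  cases hg0 : PySem.Str.pyGet? t 0 with
  | none => rw [pvBGo.eq_def]; simp only [hg0]
  | some c0 =>
    cases hg1 : PySem.Str.pyGet? t (-1) with
    | none => rw [pvBGo.eq_def]; simp only [hg0, hg1]
    | some cl =>
      rw [pvBGo.eq_def]
      simp only [hg0, hg1]
      by_cases hif : c0 ≠ '[' ∨ cl = ']'
      · simp [hif]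
      · simp only [if_neg hif]
        cases hs : pvBScan t rest with
        | none => simp
        | some p => cases p with | mk tok rs => simp

-- the main invariant: A's fold from any state equals B's remaining computation
theorem pvFold_eq (toks : List String) :
    ∀ (out : List String) (st : Option String),
      (∀ t ∈ toks, t ≠ "") →
      (toks.foldl pvAStep (out, st)).1 =
        out ++ (match st with
                | none => pvBGo toks
                | some b =>
                  match pvBScan b toks with
                  | some (tok, rs) => tok :: pvBGo rs
                  | none => []) := by
  induction toks with
  | nil =>
    intro out st _
    cases st <;> simp [pvBGo_nil, pvBScan]
  | cons t rest ih =>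
    intro out st hne
    have ht : t ≠ "" := hne t (by simp)
    have hrest : ∀ x ∈ rest, x ≠ "" := fun x hx => hne x (by simp [hx])
    obtain ⟨c0, hc0⟩ := Option.ne_none_iff_exists'.mp (pvGet0_ne_none ht)
    obtain ⟨cl, hcl⟩ := Option.ne_none_iff_exists'.mp (pvGetNeg1_ne_none ht)
    cases st with
    | none =>
      simp only [List.foldl_cons, pvAStep, hc0, hcl, pvBGo_cons]
      by_cases hif : c0 ≠ '[' ∨ cl = ']'
      · simp only [if_pos hif]
        rw [ih _ none hrest]
        simp
      · simp only [if_neg hif]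
        rw [ih _ (some t) hrest]
    | some b =>
      simp only [List.foldl_cons, pvAStep, hcl, pvBScan]
      by_cases hcl' : cl = ']'
      · simp only [if_pos hcl']
        rw [ih _ none hrest]
        simp
      · simp only [if_neg hcl']
        rw [ih _ (some (b ++ " " ++ t)) hrest]

-- ===== VERDICT (by name: the statement is the Claim_ definition above) =====
theorem dumb_tokenize_spec : Claim_equal_dumb_tokenize := by
  intro text _ hpre
  unfold Spec_dumb_tokenize dumb_tokenize dumb_tokenize_alt
  rw [pvFold_eq _ [] none hpre]
  simp
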